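-- pv_equiv track=rewrite | github.com/WilsonWangTHU/NerveNet | environments/snake_generator.py | _add_body
-- ===== SOURCE A (Python) =====
-- POD_XML_HEAD = '''
-- <body name="podBody_{POD_ID}" pos="-1 0 0">
--   <geom name='pod_{POD_ID}' density="1000" fromto="0 0 0 -1 0 0" size="0.1" type="capsule"/>
--   <joint axis="0 0 1" limited="true" name="rot_{POD_ID}" pos="0 0 0" range="-100 100" type="hinge"/>
-- '''
--
-- def _add_body(xml_content, current_pod_id, indent_level, num_pods):
--     if num_pods - 1 < 0:
--         return xml_content
--
--     # add the body head xml
--     body_xml_head = POD_XML_HEAD.replace('{POD_ID}', str(current_pod_id))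
--     body_xml_list = ['  ' * indent_level + lines
--                      for lines in body_xml_head.split('\n')]
--     xml_content += ('\n'.join(body_xml_list) + '\n')
--
--     # add another layer of body
--     xml_content = _add_body(
--         xml_content, current_pod_id + 1,
--         indent_level + 1, num_pods - 1
--     )
--
--     # add the body tail xml
--     xml_content += ('  ' * indent_level + '</body>\n')
--     return xml_content
-- ===== SOURCE B (Python) =====
-- POD_XML_HEAD = '''
-- <body name="podBody_{POD_ID}" pos="-1 0 0">
--   <geom name='pod_{POD_ID}' density="1000" fromto="0 0 0 -1 0 0" size="0.1" type="capsule"/>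
--   <joint axis="0 0 1" limited="true" name="rot_{POD_ID}" pos="0 0 0" range="-100 100" type="hinge"/>
-- '''
--
-- def _add_body(xml_content, current_pod_id, indent_level, num_pods):
--     # Iterative: one flat loop collects all head blocks and all tail lines,
--     # then the tails are appended in reverse (deepest first).
--     heads = []
--     tails = []
--     pid = current_pod_id
--     lvl = indent_level
--     remaining = num_pods
--     while remaining > 0:
--         head = POD_XML_HEAD.replace('{POD_ID}', str(pid))
--         indent = '  ' * lvl
--         heads.append('\n'.join(indent + line for line in head.split('\n')) + '\n')
--         tails.append(indent + '</body>\n')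
--         pid += 1
--         lvl += 1
--         remaining -= 1
--     return xml_content + ''.join(heads) + ''.join(reversed(tails))
-- ===== Notes on version B (the rewrite author's own statement) =====
-- stated objective: alternative
-- what changed: Replaces A's recursion (which interleaves head emission, a recursive call, and tail emission on the way back up) with a single flat loop that collects head blocks and tail lines into two lists and joins them once, heads followed by the reversed tails.
import Mathlib
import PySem

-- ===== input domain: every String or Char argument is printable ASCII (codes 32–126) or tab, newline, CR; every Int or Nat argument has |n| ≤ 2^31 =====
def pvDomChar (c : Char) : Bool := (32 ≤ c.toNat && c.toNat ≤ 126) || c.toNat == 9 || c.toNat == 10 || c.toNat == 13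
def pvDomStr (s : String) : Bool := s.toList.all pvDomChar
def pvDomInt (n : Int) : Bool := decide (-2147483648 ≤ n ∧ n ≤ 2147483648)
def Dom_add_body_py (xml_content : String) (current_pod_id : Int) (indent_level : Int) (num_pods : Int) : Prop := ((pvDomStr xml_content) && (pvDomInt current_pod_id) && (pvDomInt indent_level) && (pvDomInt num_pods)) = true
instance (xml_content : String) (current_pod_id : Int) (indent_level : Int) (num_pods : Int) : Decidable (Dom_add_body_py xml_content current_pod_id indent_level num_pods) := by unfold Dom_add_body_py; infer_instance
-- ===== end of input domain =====

-- B replaces A's recursive wrapping by one flat loop that collects head blocks and tail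
-- lines and joins them once (tails reversed); objective: a flat iterative decomposition.

-- the module constant POD_XML_HEAD (leading and trailing newline as in the triple-quoted literal)
def podXmlHead : String := "\n<body name=\"podBody_{POD_ID}\" pos=\"-1 0 0\">\n  <geom name='pod_{POD_ID}' density=\"1000\" fromto=\"0 0 0 -1 0 0\" size=\"0.1\" type=\"capsule\"/>\n  <joint axis=\"0 0 1\" limited=\"true\" name=\"rot_{POD_ID}\" pos=\"0 0 0\" range=\"-100 100\" type=\"hinge\"/>\n"

-- Python's '  ' * n on strings (n ≤ 0 gives ""); exact: pyRepeat clamps negatives to 0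
def pvStrMul (s : String) (n : Int) : String := String.ofList (PySem.List.pyRepeat s.toList n)

-- s.split('\n'); exact: the separator is nonempty, so split? is never none
def pvSplitNl (s : String) : List String := (PySem.Str.split? s "\n").getD []

-- ===== PORT A =====
def add_body_py (xml_content : String) (current_pod_id : Int) (indent_level : Int) (num_pods : Int) : String :=
  if num_pods - 1 < 0 then xml_content
  else
    let body_xml_head := PySem.Str.replace podXmlHead "{POD_ID}" (PySem.Int.toStr current_pod_id)
    let body_xml_list := (pvSplitNl body_xml_head).map (fun lines => pvStrMul "  " indent_level ++ lines)
    let xml_content := xml_content ++ (PySem.Str.join "\n" body_xml_list ++ "\n")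
    let xml_content := add_body_py xml_content (current_pod_id + 1) (indent_level + 1) (num_pods - 1)
    xml_content ++ (pvStrMul "  " indent_level ++ "</body>\n")
termination_by num_pods.toNat
decreasing_by omega

-- ===== PORT B =====
-- the while loop of Source B: collects the head blocks and the tail lines in one pass
def addBodyLoop (pid : Int) (lvl : Int) (remaining : Int) (heads : List String) (tails : List String) : List String × List String :=
  if remaining > 0 then
    let head := PySem.Str.replace podXmlHead "{POD_ID}" (PySem.Int.toStr pid)
    let indent := pvStrMul "  " lvl
    addBodyLoop (pid + 1) (lvl + 1) (remaining - 1)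
      (heads ++ [PySem.Str.join "\n" ((pvSplitNl head).map (fun line => indent ++ line)) ++ "\n"])
      (tails ++ [indent ++ "</body>\n"])
  else (heads, tails)
termination_by remaining.toNat
decreasing_by omega

def add_body_py_alt (xml_content : String) (current_pod_id : Int) (indent_level : Int) (num_pods : Int) : String :=
  let p := addBodyLoop current_pod_id indent_level num_pods [] []
  xml_content ++ PySem.Str.join "" p.1 ++ PySem.Str.join "" p.2.reverse

-- ===== PRECONDITION & SPEC =====
def Spec_add_body_py (xml_content : String) (current_pod_id : Int) (indent_level : Int) (num_pods : Int) (out : String) : Prop := out = add_body_py_alt xml_content current_pod_id indent_level num_pods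
instance (xml_content : String) (current_pod_id : Int) (indent_level : Int) (num_pods : Int) (out : String) : Decidable (Spec_add_body_py xml_content current_pod_id indent_level num_pods out) := by unfold Spec_add_body_py; infer_instance

-- ===== CLAIM (what is proved, stated in full; the proofs are below) =====
def Claim_equal_add_body_py : Prop := ∀ (xml_content : String) (current_pod_id : Int) (indent_level : Int) (num_pods : Int), Dom_add_body_py xml_content current_pod_id indent_level num_pods → Spec_add_body_py xml_content current_pod_id indent_level num_pods (add_body_py xml_content current_pod_id indent_level num_pods)

-- ===== LEMMAS AND PROOFS =====
theorem pv_inter_nil (l : List (List Char)) : List.intercalate ([] : List Char) l = l.flatten := by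
  induction l with
  | nil => rfl
  | cons a r ih =>
    cases r with
    | nil => simp [List.intercalate]
    | cons b t =>
      simp [List.intercalate, List.intersperse] at ih ⊢
      simpa using ih

theorem pv_join_empty_cons (a : String) (r : List String) :
    PySem.Str.join "" (a :: r) = a ++ PySem.Str.join "" r := by
  apply String.ext
  simp [PySem.Str.toList_join, PySem.Chars.join, pv_inter_nil]

theorem pv_join_empty_snoc (r : List String) (t : String) :
    PySem.Str.join "" (r ++ [t]) = PySem.Str.join "" r ++ t := by
  apply String.ext
  simp [PySem.Str.toList_join, PySem.Chars.join, pv_inter_nil]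

theorem addBodyLoop_stop (pid lvl r : Int) (hs ts : List String) (h : ¬ r > 0) :
    addBodyLoop pid lvl r hs ts = (hs, ts) := by
  rw [addBodyLoop]; simp [h]

-- the loop's accumulators only collect: running it from (hs, ts) appends its fresh output
theorem addBodyLoop_acc (fuel : Nat) : ∀ (pid lvl r : Int), r.toNat = fuel →
    ∀ (hs ts : List String),
    addBodyLoop pid lvl r hs ts =
      (hs ++ (addBodyLoop pid lvl r [] []).1, ts ++ (addBodyLoop pid lvl r [] []).2) := by
  induction fuel with
  | zero =>
    intro pid lvl r hr hs ts
    have h : ¬ r > 0 := by omega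
    rw [addBodyLoop_stop _ _ _ _ _ h, addBodyLoop_stop _ _ _ _ _ h]
    simp
  | succ n ih =>
    intro pid lvl r hr hs ts
    have h : r > 0 := by omega
    rw [addBodyLoop]
    conv_rhs => rw [addBodyLoop]
    simp only [h, if_pos]
    rw [ih (pid + 1) (lvl + 1) (r - 1) (by omega),
        ih (pid + 1) (lvl + 1) (r - 1) (by omega) (_ ++ [_])]
    simp

-- B satisfies A's recurrence
theorem alt_step (xml : String) (pid lvl r : Int) (h2 : r > 0) :
    add_body_py_alt xml pid lvl r =
      add_body_py_alt
        (xml ++ (PySem.Str.join "\n"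
          ((pvSplitNl (PySem.Str.replace podXmlHead "{POD_ID}" (PySem.Int.toStr pid))).map
            (fun lines => pvStrMul "  " lvl ++ lines)) ++ "\n"))
        (pid + 1) (lvl + 1) (r - 1)
      ++ (pvStrMul "  " lvl ++ "</body>\n") := by
  unfold add_body_py_alt
  conv_lhs => rw [addBodyLoop]
  simp only [h2, if_pos, List.nil_append]
  rw [addBodyLoop_acc (r - 1).toNat (pid + 1) (lvl + 1) (r - 1) rfl]
  simp only [List.reverse_cons, List.singleton_append]
  rw [pv_join_empty_cons, pv_join_empty_snoc]
  simp [String.append_assoc]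

theorem pv_main (fuel : Nat) : ∀ (xml : String) (pid lvl r : Int), r.toNat = fuel →
    add_body_py xml pid lvl r = add_body_py_alt xml pid lvl r := by
  induction fuel with
  | zero =>
    intro xml pid lvl r hr
    have h : r - 1 < 0 := by omega
    have h2 : ¬ r > 0 := by omega
    rw [add_body_py, add_body_py_alt, addBodyLoop_stop _ _ _ _ _ h2]
    simp [h, PySem.Str.join]
  | succ n ih =>
    intro xml pid lvl r hr
    have h : ¬ r - 1 < 0 := by omega
    have h2 : r > 0 := by omega
    rw [add_body_py]
    simp only [h, if_neg, not_false_iff]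
    rw [ih _ (pid + 1) (lvl + 1) (r - 1) (by omega), alt_step _ _ _ _ h2]

-- ===== VERDICT (by name: the statement is the Claim_ definition above) =====
theorem add_body_py_spec : Claim_equal_add_body_py := by
  intro xml_content current_pod_id indent_level num_pods _
  unfold Spec_add_body_py
  exact pv_main num_pods.toNat xml_content current_pod_id indent_level num_pods rfl
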